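-- pv_equiv track=rewrite | github.com/cacaview/py-claw | src/py_claw/services/diff/__init__.py | _format_hunk_lines
-- ===== SOURCE A (Python) =====
-- def _compute_lcs(old: list[str], new: list[str]) -> list[tuple[int, int]]:
--     """
--     Compute Longest Common Subsequence between two lines.
--
--     Returns list of (old_index, new_index) pairs representing the LCS.
--     """
--     m, n = len(old), len(new)
--
--     # Build DP table
--     dp = [[0] * (n + 1) for _ in range(m + 1)]
--     for i in range(1, m + 1):
--         for j in range(1, n + 1):
--             if old[i - 1] == new[j - 1]:
--                 dp[i][j] = dp[i - 1][j - 1] + 1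
--             else:
--                 dp[i][j] = max(dp[i - 1][j], dp[i][j - 1])
--
--     # Backtrack to find LCS
--     lcs = []
--     i, j = m, n
--     while i > 0 and j > 0:
--         if old[i - 1] == new[j - 1]:
--             lcs.append((i - 1, j - 1))
--             i -= 1
--             j -= 1
--         elif dp[i - 1][j] > dp[i][j - 1]:
--             i -= 1
--         else:
--             j -= 1
--
--     lcs.reverse()
--     return lcs
--
-- def _format_hunk_lines(
--     old_lines: list[str],
--     new_lines: list[str],
--     old_start: int,
--     old_end: int,
--     new_start: int,
--     new_end: int,
-- ) -> list[str]:
--     """Format lines for a hunk, marking changes with +/-."""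
--     result: list[str] = []
--
--     # Build LCS index for the hunk range
--     old_range = old_lines[old_start:old_end]
--     new_range = new_lines[new_start:new_end]
--
--     lcs = _compute_lcs(old_range, new_range)
--
--     # Convert LCS indices to absolute positions
--     lcs_pairs: list[tuple[int, int]] = [(old_start + i, new_start + j) for i, j in lcs]
--
--     # Track matched pairs
--     matched_old = {o for o, n in lcs_pairs}
--     matched_new = {n for o, n in lcs_pairs}
--
--     # Collect removed and added lines
--     removed = set(range(old_start, old_end)) - matched_old
--     added = set(range(new_start, new_end)) - matched_new
--
--     # Build result in proper order
--     current_old = old_start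
--     current_new = new_start
--
--     while current_old < old_end or current_new < new_end:
--         # Check if current pair is in LCS (matched)
--         if (current_old, current_new) in lcs_pairs:
--             # Context line (unchanged)
--             result.append(" " + old_lines[current_old].rstrip("\n"))
--             current_old += 1
--             current_new += 1
--         elif current_old in removed and current_new < new_end and current_new in added:
--             # Line was modified
--             result.append("-" + old_lines[current_old].rstrip("\n"))
--             result.append("+" + new_lines[current_new].rstrip("\n"))
--             current_old += 1
--             current_new += 1
--         elif current_old in removed:
--             # Line was removed
--             result.append("-" + old_lines[current_old].rstrip("\n"))
--             current_old += 1
--         elif current_new in added: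
--             # Line was added
--             result.append("+" + new_lines[current_new].rstrip("\n"))
--             current_new += 1
--         else:
--             # Advance both (shouldn't happen in normal cases)
--             if current_old < old_end:
--                 current_old += 1
--             if current_new < new_end:
--                 current_new += 1
--
--     return result
-- ===== SOURCE B (Python) =====
-- def _compute_lcs(old, new):
--     m, n = len(old), len(new)
--     dp = [[0] * (n + 1) for _ in range(m + 1)]
--     for i in range(1, m + 1):
--         for j in range(1, n + 1):
--             if old[i - 1] == new[j - 1]:
--                 dp[i][j] = dp[i - 1][j - 1] + 1
--             else:
--                 dp[i][j] = max(dp[i - 1][j], dp[i][j - 1])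
--     lcs = []
--     i, j = m, n
--     while i > 0 and j > 0:
--         if old[i - 1] == new[j - 1]:
--             lcs.append((i - 1, j - 1))
--             i -= 1
--             j -= 1
--         elif dp[i - 1][j] > dp[i][j - 1]:
--             i -= 1
--         else:
--             j -= 1
--     lcs.reverse()
--     return lcs
--
--
-- def _format_hunk_lines(old_lines, new_lines, old_start, old_end, new_start, new_end):
--     """Format lines for a hunk, marking changes with +/-, driven by the LCS anchors."""
--     lcs = _compute_lcs(old_lines[old_start:old_end], new_lines[new_start:new_end])
--     anchors = [(old_start + i, new_start + j) for i, j in lcs]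
--
--     def gap(o, o_stop, n, n_stop):
--         # Lines between two anchors: changed pairs first, then the leftover side.
--         out = []
--         while o < o_stop and n < n_stop:
--             out.append("-" + old_lines[o].rstrip("\n"))
--             out.append("+" + new_lines[n].rstrip("\n"))
--             o += 1
--             n += 1
--         while o < o_stop:
--             out.append("-" + old_lines[o].rstrip("\n"))
--             o += 1
--         while n < n_stop:
--             out.append("+" + new_lines[n].rstrip("\n"))
--             n += 1
--         return out
--
--     result = []
--     prev_old, prev_new = old_start, new_start
--     for a_old, a_new in anchors:
--         result += gap(prev_old, a_old, prev_new, a_new)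
--         result.append(" " + old_lines[a_old].rstrip("\n"))
--         prev_old, prev_new = a_old + 1, a_new + 1
--     result += gap(prev_old, old_end, prev_new, new_end)
--     return result
-- ===== Notes on version B (the rewrite author's own statement) =====
-- stated objective: simpler
-- what changed: B drives the output off the LCS anchor list (for each gap between consecutive anchors emit the interleaved -/+ pairs then the leftover side, then the context line), replacing A's single index walk that tests membership in lcs_pairs/removed/added sets at every position; _compute_lcs is kept unchanged.
-- outside the precondition, e.g. on _format_hunk_lines(['a', 'b'], ['c'], 0, 5, 0, 1): A raises IndexError, B raises IndexError; on _format_hunk_lines(['a', 'b', 'd', 'c'], ['a', 'c'], 0, -1, 0, -1): A returns [], B returns [' a']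
import Mathlib
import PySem

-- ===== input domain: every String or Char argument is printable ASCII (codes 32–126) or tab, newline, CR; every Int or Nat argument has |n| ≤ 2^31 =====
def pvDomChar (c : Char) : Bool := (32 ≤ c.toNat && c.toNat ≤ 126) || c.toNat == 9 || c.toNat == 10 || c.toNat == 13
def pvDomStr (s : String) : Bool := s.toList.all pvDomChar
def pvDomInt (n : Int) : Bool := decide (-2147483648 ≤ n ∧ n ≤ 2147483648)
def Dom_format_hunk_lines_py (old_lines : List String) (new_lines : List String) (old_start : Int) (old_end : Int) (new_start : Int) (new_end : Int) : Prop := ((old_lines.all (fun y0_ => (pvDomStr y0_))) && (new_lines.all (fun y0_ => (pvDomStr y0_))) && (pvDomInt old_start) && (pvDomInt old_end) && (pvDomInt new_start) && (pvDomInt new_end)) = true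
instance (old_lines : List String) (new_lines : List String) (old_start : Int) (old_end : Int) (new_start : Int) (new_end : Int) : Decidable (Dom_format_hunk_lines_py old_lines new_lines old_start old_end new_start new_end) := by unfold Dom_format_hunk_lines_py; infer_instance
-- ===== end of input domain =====

-- B restructures _format_hunk_lines to drive the output off the LCS anchor list (gap between
-- consecutive anchors, then the context line) instead of A's index walk with membership sets;
-- objective: simpler. _compute_lcs is kept unchanged (shared helpers below serve both ports).

-- ===== SHARED HELPERS (the Python helper _compute_lcs is shared verbatim by A and B) =====

-- s.rstrip("\n"): drop trailing newline characters (hand port, exact: rstrip with an explicit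
-- character set is not a PySem primitive)
def rstripNl (s : String) : String :=
  String.ofList ((s.toList.reverse.dropWhile (fun c => c == '\n')).reverse)

-- xs[i]; every use below is under Pre_, where the index is in Python range (no IndexError)
def pvGet (xs : List String) (i : Int) : String := PySem.List.pyGetD xs i ""

-- dp[i][j] / dp[i][j] = v ; all indices used are in range by construction of the DP table
def dpGet (dp : List (List Int)) (i j : Int) : Int :=
  PySem.List.pyGetD (PySem.List.pyGetD dp i []) j 0
def dpSet (dp : List (List Int)) (i j : Int) (v : Int) : List (List Int) :=
  PySem.List.pySetD dp i (PySem.List.pySetD (PySem.List.pyGetD dp i []) j v)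

-- the DP-table phase of _compute_lcs
def lcsDp (old new : List String) : List (List Int) :=
  let m : Int := old.length
  let n : Int := new.length
  let dp0 : List (List Int) :=
    (PySem.List.pyRange 0 (m + 1) 1).map (fun _ => (PySem.List.pyRange 0 (n + 1) 1).map (fun _ => (0 : Int)))
  (PySem.List.pyRange 1 (m + 1) 1).foldl (fun dp i =>
    (PySem.List.pyRange 1 (n + 1) 1).foldl (fun dp j =>
      dpSet dp i j
        (if pvGet old (i - 1) == pvGet new (j - 1) then dpGet dp (i - 1) (j - 1) + 1
         else max (dpGet dp (i - 1) j) (dpGet dp i (j - 1)))) dp) dp0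

-- the backtracking while-loop of _compute_lcs (list built in append order; reversed by the caller)
def lcsBack (old new : List String) (dp : List (List Int)) (i j : Int) : List (Int × Int) :=
  if h : 0 < i ∧ 0 < j then
    if pvGet old (i - 1) == pvGet new (j - 1) then
      (i - 1, j - 1) :: lcsBack old new dp (i - 1) (j - 1)
    else if dpGet dp (i - 1) j > dpGet dp i (j - 1) then
      lcsBack old new dp (i - 1) j
    else
      lcsBack old new dp i (j - 1)
  else []
termination_by i.toNat + j.toNat
decreasing_by all_goals omega

def compute_lcs (old new : List String) : List (Int × Int) :=
  (lcsBack old new (lcsDp old new) old.length new.length).reverse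

-- ===== PORT A =====

-- A's while-loop; fuel bounds the iteration count (each iteration strictly shrinks
-- (oe-co).toNat+(ne-cn).toNat, so the initial fuel below is never exhausted)
def walkA (ol nl : List String) (oe ne : Int) (lcs_pairs : List (Int × Int))
    (removed added : List Int) : Nat → Int → Int → List String
  | 0, _, _ => []
  | fuel + 1, co, cn =>
    if co < oe ∨ cn < ne then
      if (co, cn) ∈ lcs_pairs then
        (" " ++ rstripNl (pvGet ol co)) :: walkA ol nl oe ne lcs_pairs removed added fuel (co + 1) (cn + 1)
      else if co ∈ removed ∧ cn < ne ∧ cn ∈ added then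
        ("-" ++ rstripNl (pvGet ol co)) :: ("+" ++ rstripNl (pvGet nl cn)) ::
          walkA ol nl oe ne lcs_pairs removed added fuel (co + 1) (cn + 1)
      else if co ∈ removed then
        ("-" ++ rstripNl (pvGet ol co)) :: walkA ol nl oe ne lcs_pairs removed added fuel (co + 1) cn
      else if cn ∈ added then
        ("+" ++ rstripNl (pvGet nl cn)) :: walkA ol nl oe ne lcs_pairs removed added fuel co (cn + 1)
      else
        walkA ol nl oe ne lcs_pairs removed added fuel
          (if co < oe then co + 1 else co) (if cn < ne then cn + 1 else cn)
    else []

def format_hunk_lines_py (old_lines : List String) (new_lines : List String) (old_start : Int) (old_end : Int) (new_start : Int) (new_end : Int) : List String :=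
  let old_range := PySem.List.slice old_lines (some old_start) (some old_end)
  let new_range := PySem.List.slice new_lines (some new_start) (some new_end)
  let lcs := compute_lcs old_range new_range
  let lcs_pairs := lcs.map (fun p => (old_start + p.1, new_start + p.2))
  let matched_old : PySem.Set Int := PySem.Set.ofList (lcs_pairs.map Prod.fst)
  let matched_new : PySem.Set Int := PySem.Set.ofList (lcs_pairs.map Prod.snd)
  let removed := PySem.Set.diff (PySem.Set.ofList (PySem.List.pyRange old_start old_end 1)) matched_old
  let added := PySem.Set.diff (PySem.Set.ofList (PySem.List.pyRange new_start new_end 1)) matched_new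
  walkA old_lines new_lines old_end new_end lcs_pairs removed added
    ((old_end - old_start).toNat + (new_end - new_start).toNat + 1) old_start new_start

-- ===== PORT B =====

-- first while of B's gap helper: the changed "-"/"+" pairs, returning the advanced (o, n)
def gapPairs (ol nl : List String) (o oS n nS : Int) : List String × Int × Int :=
  if h : o < oS ∧ n < nS then
    let r := gapPairs ol nl (o + 1) oS (n + 1) nS
    (("-" ++ rstripNl (pvGet ol o)) :: ("+" ++ rstripNl (pvGet nl n)) :: r.1, r.2)
  else ([], o, n)
termination_by (oS - o).toNat
decreasing_by omega

-- second while: leftover removed lines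
def gapMinus (ol : List String) (o oS : Int) : List String :=
  if o < oS then ("-" ++ rstripNl (pvGet ol o)) :: gapMinus ol (o + 1) oS else []
termination_by (oS - o).toNat
decreasing_by omega

-- third while: leftover added lines
def gapPlus (nl : List String) (n nS : Int) : List String :=
  if n < nS then ("+" ++ rstripNl (pvGet nl n)) :: gapPlus nl (n + 1) nS else []
termination_by (nS - n).toNat
decreasing_by omega

-- B's gap(o, o_stop, n, n_stop)
def gapB (ol nl : List String) (o oS n nS : Int) : List String :=
  let t := gapPairs ol nl o oS n nS
  t.1 ++ gapMinus ol t.2.1 oS ++ gapPlus nl t.2.2 nS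

-- B's anchor loop with the trailing gap
def walkB (ol nl : List String) (oe ne : Int) : List (Int × Int) → Int → Int → List String
  | [], po, pn => gapB ol nl po oe pn ne
  | a :: rest, po, pn =>
    gapB ol nl po a.1 pn a.2 ++
      ((" " ++ rstripNl (pvGet ol a.1)) :: walkB ol nl oe ne rest (a.1 + 1) (a.2 + 1))

def format_hunk_lines_py_alt (old_lines : List String) (new_lines : List String) (old_start : Int) (old_end : Int) (new_start : Int) (new_end : Int) : List String :=
  let lcs := compute_lcs (PySem.List.slice old_lines (some old_start) (some old_end))
                         (PySem.List.slice new_lines (some new_start) (some new_end))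
  let anchors := lcs.map (fun p => (old_start + p.1, new_start + p.2))
  walkB old_lines new_lines old_end new_end anchors old_start new_start

-- ===== PRECONDITION & SPEC =====

-- Pre_ restricts each hunk range to its natural shape: an active range (start < end) must lie
-- within Python index range of its list, and a degenerate range (end <= start) must be one that
-- Python's slice also reads as empty (not a mixed-sign pair like [2:-1] that slices non-empty).
-- Outside Pre_, A either raises IndexError or its value leans on negative-index wraparound /
-- slice clamping accidents of the implementation.
def PreSide (len s e : Int) : Prop :=
  (s < e → -len ≤ s ∧ e ≤ len) ∧ (e ≤ s → (0 ≤ e ∨ s < 0 ∨ len + e ≤ s))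

def Pre_format_hunk_lines_py (old_lines : List String) (new_lines : List String) (old_start : Int) (old_end : Int) (new_start : Int) (new_end : Int) : Prop :=
  PreSide old_lines.length old_start old_end ∧ PreSide new_lines.length new_start new_end

instance (old_lines : List String) (new_lines : List String) (old_start : Int) (old_end : Int) (new_start : Int) (new_end : Int) : Decidable (Pre_format_hunk_lines_py old_lines new_lines old_start old_end new_start new_end) := by
  unfold Pre_format_hunk_lines_py PreSide; infer_instance

def pvWitness_format_hunk_lines_py : List String × List String × Int × Int × Int × Int :=
  (["keep\n", "gone\n", "tail\n"], ["keep\n", "here\n", "tail\n"], 0, 3, 0, 3)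

def Spec_format_hunk_lines_py (old_lines : List String) (new_lines : List String) (old_start : Int) (old_end : Int) (new_start : Int) (new_end : Int) (out : List String) : Prop := out = format_hunk_lines_py_alt old_lines new_lines old_start old_end new_start new_end
instance (old_lines : List String) (new_lines : List String) (old_start : Int) (old_end : Int) (new_start : Int) (new_end : Int) (out : List String) : Decidable (Spec_format_hunk_lines_py old_lines new_lines old_start old_end new_start new_end out) := by unfold Spec_format_hunk_lines_py; infer_instance

-- ===== CLAIM (what is proved, stated in full; the proofs are below) =====
def Claim_equal_format_hunk_lines_py : Prop := ∀ (old_lines : List String) (new_lines : List String) (old_start : Int) (old_end : Int) (new_start : Int) (new_end : Int), Dom_format_hunk_lines_py old_lines new_lines old_start old_end new_start new_end → Pre_format_hunk_lines_py old_lines new_lines old_start old_end new_start new_end → Spec_format_hunk_lines_py old_lines new_lines old_start old_end new_start new_end (format_hunk_lines_py old_lines new_lines old_start old_end new_start new_end)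

-- ===== LEMMAS AND PROOFS =====

theorem gapB_nil {ol nl : List String} {o oS n nS : Int} (h1 : ¬ o < oS) (h2 : ¬ n < nS) :
    gapB ol nl o oS n nS = [] := by
  unfold gapB
  rw [gapPairs, dif_neg (by tauto : ¬ (o < oS ∧ n < nS))]
  dsimp only
  rw [gapMinus.eq_def]; rw [if_neg h1]
  rw [gapPlus.eq_def]; rw [if_neg h2]
  rfl

theorem gapB_both {ol nl : List String} {o oS n nS : Int} (h1 : o < oS) (h2 : n < nS) :
    gapB ol nl o oS n nS =
      ("-" ++ rstripNl (pvGet ol o)) :: ("+" ++ rstripNl (pvGet nl n)) :: gapB ol nl (o + 1) oS (n + 1) nS := by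
  unfold gapB
  rw [gapPairs, dif_pos ⟨h1, h2⟩]
  simp

theorem gapB_minus {ol nl : List String} {o oS n nS : Int} (h1 : o < oS) (h2 : ¬ n < nS) :
    gapB ol nl o oS n nS = ("-" ++ rstripNl (pvGet ol o)) :: gapB ol nl (o + 1) oS n nS := by
  unfold gapB
  rw [gapPairs, dif_neg (by tauto : ¬ (o < oS ∧ n < nS)), gapPairs, dif_neg (by tauto : ¬ (o + 1 < oS ∧ n < nS))]
  dsimp only
  rw [gapMinus.eq_def]; rw [if_pos h1]
  simp

theorem gapB_plus {ol nl : List String} {o oS n nS : Int} (h1 : ¬ o < oS) (h2 : n < nS) :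
    gapB ol nl o oS n nS = ("+" ++ rstripNl (pvGet nl n)) :: gapB ol nl o oS (n + 1) nS := by
  unfold gapB
  rw [gapPairs, dif_neg (by tauto : ¬ (o < oS ∧ n < nS)), gapPairs, dif_neg (by tauto : ¬ (o < oS ∧ n + 1 < nS))]
  dsimp only
  rw [gapMinus.eq_def]; rw [if_neg h1]
  rw [gapPlus.eq_def]; rw [if_pos h2]
  simp

theorem lcsBack_facts (old new : List String) (dp : List (List Int)) (i j : Int) :
    (∀ p ∈ lcsBack old new dp i j, 0 ≤ p.1 ∧ p.1 < i ∧ 0 ≤ p.2 ∧ p.2 < j) ∧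
      List.Pairwise (fun p q : Int × Int => q.1 < p.1 ∧ q.2 < p.2) (lcsBack old new dp i j) := by
  fun_induction lcsBack old new dp i j with
  | case1 i j h heq ih =>
    obtain ⟨ihb, ihp⟩ := ih
    refine ⟨?_, ?_⟩
    · rintro p hp
      rcases List.mem_cons.mp hp with rfl | hp
      · exact ⟨by omega, by omega, by omega, by omega⟩
      · have := ihb p hp; exact ⟨this.1, by omega, this.2.2.1, by omega⟩
    · exact List.pairwise_cons.mpr ⟨fun q hq => ⟨by have := (ihb q hq).2.1; omega, by have := (ihb q hq).2.2.2; omega⟩, ihp⟩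
  | case2 i j h heq hgt ih =>
    obtain ⟨ihb, ihp⟩ := ih
    exact ⟨fun p hp => by have := ihb p hp; exact ⟨this.1, by omega, this.2.2.1, this.2.2.2⟩, ihp⟩
  | case3 i j h heq hle ih =>
    obtain ⟨ihb, ihp⟩ := ih
    exact ⟨fun p hp => by have := ihb p hp; exact ⟨this.1, this.2.1, this.2.2.1, by omega⟩, ihp⟩
  | case4 i j h => simp

theorem walkB_cons_both {ol nl : List String} {oe ne : Int} {a : Int × Int} {rest : List (Int × Int)}
    {co cn : Int} (h1 : co < a.1) (h2 : cn < a.2) :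
    walkB ol nl oe ne (a :: rest) co cn =
      ("-" ++ rstripNl (pvGet ol co)) :: ("+" ++ rstripNl (pvGet nl cn)) ::
        walkB ol nl oe ne (a :: rest) (co + 1) (cn + 1) := by
  rw [walkB, walkB, gapB_both h1 h2]; simp

theorem walkB_cons_minus {ol nl : List String} {oe ne : Int} {a : Int × Int} {rest : List (Int × Int)}
    {co cn : Int} (h1 : co < a.1) (h2 : ¬ cn < a.2) :
    walkB ol nl oe ne (a :: rest) co cn =
      ("-" ++ rstripNl (pvGet ol co)) :: walkB ol nl oe ne (a :: rest) (co + 1) cn := by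
  rw [walkB, walkB, gapB_minus h1 h2]; simp

theorem walkB_cons_plus {ol nl : List String} {oe ne : Int} {a : Int × Int} {rest : List (Int × Int)}
    {co cn : Int} (h1 : ¬ co < a.1) (h2 : cn < a.2) :
    walkB ol nl oe ne (a :: rest) co cn =
      ("+" ++ rstripNl (pvGet nl cn)) :: walkB ol nl oe ne (a :: rest) co (cn + 1) := by
  rw [walkB, walkB, gapB_plus h1 h2]; simp

theorem walkB_cons_ctx {ol nl : List String} {oe ne : Int} {a : Int × Int} {rest : List (Int × Int)} :
    walkB ol nl oe ne (a :: rest) a.1 a.2 =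
      (" " ++ rstripNl (pvGet ol a.1)) :: walkB ol nl oe ne rest (a.1 + 1) (a.2 + 1) := by
  rw [walkB, gapB_nil (by omega) (by omega)]; simp

theorem walkB_nil_both {ol nl : List String} {oe ne co cn : Int} (h1 : co < oe) (h2 : cn < ne) :
    walkB ol nl oe ne [] co cn =
      ("-" ++ rstripNl (pvGet ol co)) :: ("+" ++ rstripNl (pvGet nl cn)) ::
        walkB ol nl oe ne [] (co + 1) (cn + 1) := by
  rw [walkB, walkB, gapB_both h1 h2]

theorem walkB_nil_minus {ol nl : List String} {oe ne co cn : Int} (h1 : co < oe) (h2 : ¬ cn < ne) :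
    walkB ol nl oe ne [] co cn =
      ("-" ++ rstripNl (pvGet ol co)) :: walkB ol nl oe ne [] (co + 1) cn := by
  rw [walkB, walkB, gapB_minus h1 h2]

theorem walkB_nil_plus {ol nl : List String} {oe ne co cn : Int} (h1 : ¬ co < oe) (h2 : cn < ne) :
    walkB ol nl oe ne [] co cn =
      ("+" ++ rstripNl (pvGet nl cn)) :: walkB ol nl oe ne [] co (cn + 1) := by
  rw [walkB, walkB, gapB_plus h1 h2]

theorem walkB_nil_nil {ol nl : List String} {oe ne co cn : Int} (h1 : ¬ co < oe) (h2 : ¬ cn < ne) :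
    walkB ol nl oe ne [] co cn = [] := by
  rw [walkB, gapB_nil h1 h2]

-- the central loop correspondence: A's index walk equals B's anchor walk
theorem walkA_eq_walkB (ol nl : List String) (os oe ns ne : Int) (full : List (Int × Int))
    (removed added : List Int)
    (hmono : List.Pairwise (fun p q : Int × Int => p.1 < q.1 ∧ p.2 < q.2) full)
    (hbound : ∀ p ∈ full, os ≤ p.1 ∧ p.1 < oe ∧ ns ≤ p.2 ∧ p.2 < ne)
    (hrem : ∀ x : Int, x ∈ removed ↔ (os ≤ x ∧ x < oe ∧ x ∉ full.map Prod.fst))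
    (hadd : ∀ x : Int, x ∈ added ↔ (ns ≤ x ∧ x < ne ∧ x ∉ full.map Prod.snd)) :
    ∀ (fuel : Nat) (pref rem : List (Int × Int)) (co cn : Int),
      full = pref ++ rem →
      (∀ p ∈ pref, p.1 < co ∧ p.2 < cn) →
      os ≤ co → ns ≤ cn →
      (∀ a ∈ rem.head?, co ≤ a.1 ∧ cn ≤ a.2) →
      (oe - co).toNat + (ne - cn).toNat < fuel →
      walkA ol nl oe ne full removed added fuel co cn = walkB ol nl oe ne rem co cn := by
  intro fuel
  induction fuel with
  | zero => intro pref rem co cn _ _ _ _ _ hf; omega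
  | succ f ih =>
    intro pref rem co cn hsplit hpref hco hcn hhead hf
    have hfst : ∀ x : Int, x ∈ full.map Prod.fst ↔ ∃ p ∈ full, p.1 = x := by
      intro x; simp [List.mem_map]
    have hsnd : ∀ x : Int, x ∈ full.map Prod.snd ↔ ∃ p ∈ full, p.2 = x := by
      intro x; simp [List.mem_map]
    cases rem with
    | nil =>
      -- full = pref : everything to the right of every anchor
      have hprefall : ∀ p ∈ full, p.1 < co ∧ p.2 < cn := by
        intro p hp; exact hpref p (by simpa [hsplit] using hp)
      have hnm : (co, cn) ∉ full := fun h => absurd (hprefall _ h).1 (lt_irrefl co)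
      have hnf : co ∉ full.map Prod.fst := by
        intro h; obtain ⟨p, hp, hpe⟩ := (hfst co).mp h
        exact absurd (hpe ▸ (hprefall p hp).1) (lt_irrefl co)
      have hns : cn ∉ full.map Prod.snd := by
        intro h; obtain ⟨p, hp, hpe⟩ := (hsnd cn).mp h
        exact absurd (hpe ▸ (hprefall p hp).2) (lt_irrefl cn)
      by_cases h1 : co < oe
      · by_cases h2 : cn < ne
        · rw [walkA, if_pos (Or.inl h1), if_neg hnm,
            if_pos ⟨(hrem co).mpr ⟨hco, h1, hnf⟩, h2, (hadd cn).mpr ⟨hcn, h2, hns⟩⟩,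
            walkB_nil_both h1 h2]
          refine congrArg _ (congrArg _ (ih pref [] (co + 1) (cn + 1) hsplit ?_ ?_ ?_ ?_ ?_))
          · intro p hp; have := hpref p hp; omega
          · omega
          · omega
          · simp
          · omega
        · rw [walkA, if_pos (Or.inl h1), if_neg hnm,
            if_neg (by rintro ⟨-, h, -⟩; exact h2 h),
            if_pos ((hrem co).mpr ⟨hco, h1, hnf⟩), walkB_nil_minus h1 h2]
          refine congrArg _ (ih pref [] (co + 1) cn hsplit ?_ ?_ hcn ?_ ?_)
          · intro p hp; have := hpref p hp; omega
          · omega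
          · simp
          · omega
      · by_cases h2 : cn < ne
        · have hnr : co ∉ removed := by
            intro h; exact h1 ((hrem co).mp h).2.1
          rw [walkA, if_pos (Or.inr h2), if_neg hnm,
            if_neg (by rintro ⟨h, -, -⟩; exact hnr h), if_neg hnr,
            if_pos ((hadd cn).mpr ⟨hcn, h2, hns⟩), walkB_nil_plus h1 h2]
          refine congrArg _ (ih pref [] co (cn + 1) hsplit ?_ hco ?_ ?_ ?_)
          · intro p hp; have := hpref p hp; omega
          · omega
          · simp
          · omega
        · rw [walkA, if_neg (by tauto), walkB_nil_nil h1 h2]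
    | cons a rest =>
      have hha : co ≤ a.1 ∧ cn ≤ a.2 := hhead a rfl
      have hafull : a ∈ full := by rw [hsplit]; simp
      have hba := hbound a hafull
      have hpa : ∀ q ∈ rest, a.1 < q.1 ∧ a.2 < q.2 := by
        have := hsplit ▸ hmono
        have h2 := (List.pairwise_append.mp this).2.1
        exact (List.pairwise_cons.mp h2).1
      by_cases h1 : co < a.1
      · have hnm : (co, cn) ∉ full := by
          intro h
          rcases List.mem_append.mp (hsplit ▸ h) with hp' | hp'
          · exact absurd ((hpref _ hp').1) (lt_irrefl co)
          · rcases List.mem_cons.mp hp' with heq | hp''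
            · have : a.1 = co := by rw [← heq]
              omega
            · have := hpa _ hp''; simp at this; omega
        have hnf : co ∉ full.map Prod.fst := by
          intro h; obtain ⟨p, hp, hpe⟩ := (hfst co).mp h
          rcases List.mem_append.mp (hsplit ▸ hp) with hp' | hp'
          · exact absurd (hpe ▸ (hpref p hp').1) (lt_irrefl co)
          · rcases List.mem_cons.mp hp' with rfl | hp''
            · omega
            · have := hpa p hp''; omega
        have hcoe : co < oe := by omega
        have hrco : co ∈ removed := (hrem co).mpr ⟨hco, hcoe, hnf⟩
        by_cases h2 : cn < a.2
        · have hns : cn ∉ full.map Prod.snd := by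
            intro h; obtain ⟨p, hp, hpe⟩ := (hsnd cn).mp h
            rcases List.mem_append.mp (hsplit ▸ hp) with hp' | hp'
            · exact absurd (hpe ▸ (hpref p hp').2) (lt_irrefl cn)
            · rcases List.mem_cons.mp hp' with rfl | hp''
              · omega
              · have := hpa p hp''; omega
          have hcne : cn < ne := by omega
          rw [walkA, if_pos (Or.inl hcoe), if_neg hnm,
            if_pos ⟨hrco, hcne, (hadd cn).mpr ⟨hcn, hcne, hns⟩⟩, walkB_cons_both h1 h2]
          refine congrArg _ (congrArg _ (ih pref (a :: rest) (co + 1) (cn + 1) hsplit ?_ ?_ ?_ ?_ ?_))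
          · intro p hp; have := hpref p hp; omega
          · omega
          · omega
          · intro b hb; simp at hb; subst hb; omega
          · omega
        · -- cn = a.2 : the anchor's new line is matched, only the old side moves
          have hcna : cn = a.2 := by omega
          have hnadd : cn ∉ added := by
            intro h
            have := ((hadd cn).mp h).2.2
            exact this ((hsnd cn).mpr ⟨a, hafull, hcna.symm⟩)
          rw [walkA, if_pos (Or.inl hcoe), if_neg hnm,
            if_neg (by rintro ⟨-, -, h⟩; exact hnadd h), if_pos hrco, walkB_cons_minus h1 h2]
          refine congrArg _ (ih pref (a :: rest) (co + 1) cn hsplit ?_ ?_ hcn ?_ ?_)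
          · intro p hp; have := hpref p hp; omega
          · omega
          · intro b hb; simp at hb; subst hb; omega
          · omega
      · have hcoa : co = a.1 := by omega
        have hcoe : co < oe := by omega
        have hnrem : co ∉ removed := by
          intro h
          exact ((hrem co).mp h).2.2 ((hfst co).mpr ⟨a, hafull, hcoa.symm⟩)
        by_cases h2 : cn < a.2
        · have hnm : (co, cn) ∉ full := by
            intro h
            rcases List.mem_append.mp (hsplit ▸ h) with hp' | hp'
            · exact absurd ((hpref _ hp').1) (lt_irrefl co)
            · rcases List.mem_cons.mp hp' with heq | hp''
              · have : a.2 = cn := by rw [← heq]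
                omega
              · have := hpa _ hp''; simp at this; omega
          have hns : cn ∉ full.map Prod.snd := by
            intro h; obtain ⟨p, hp, hpe⟩ := (hsnd cn).mp h
            rcases List.mem_append.mp (hsplit ▸ hp) with hp' | hp'
            · exact absurd (hpe ▸ (hpref p hp').2) (lt_irrefl cn)
            · rcases List.mem_cons.mp hp' with rfl | hp''
              · omega
              · have := hpa p hp''; omega
          have hcne : cn < ne := by omega
          rw [walkA, if_pos (Or.inl hcoe), if_neg hnm,
            if_neg (by rintro ⟨h, -, -⟩; exact hnrem h), if_neg hnrem,
            if_pos ((hadd cn).mpr ⟨hcn, hcne, hns⟩), walkB_cons_plus h1 h2]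
          refine congrArg _ (ih pref (a :: rest) co (cn + 1) hsplit ?_ hco ?_ ?_ ?_)
          · intro p hp; have := hpref p hp; omega
          · omega
          · intro b hb; simp at hb; subst hb; omega
          · omega
        · -- co = a.1, cn = a.2 : the anchor itself, a context line
          have hcna : cn = a.2 := by omega
          have hm : (co, cn) ∈ full := by
            rw [hsplit]
            have : (co, cn) = a := by rw [hcoa, hcna]
            simp [this]
          rw [walkA, if_pos (Or.inl hcoe), if_pos hm, hcoa, hcna, walkB_cons_ctx]
          refine congrArg _ (ih (pref ++ [a]) rest (a.1 + 1) (a.2 + 1) ?_ ?_ ?_ ?_ ?_ ?_)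
          · simp [hsplit]
          · intro p hp
            rcases List.mem_append.mp hp with hp' | hp'
            · have := hpref p hp'; omega
            · simp at hp'; subst hp'; omega
          · omega
          · omega
          · intro b hb
            cases rest with
            | nil => simp at hb
            | cons b' rest' =>
              simp at hb; subst hb
              have := hpa b' (by simp); omega
          · omega

theorem slice_length_le (xs : List String) (s e : Int) (h : s ≤ e) :
    ((PySem.List.slice xs (some s) (some e)).length : Int) ≤ e - s := by
  rw [PySem.List.length_slice]
  unfold PySem.List.clampIdx
  split_ifs <;> omega

theorem slice_degen_nil (xs : List String) (s e : Int) (h : e ≤ s)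
    (h2 : 0 ≤ e ∨ s < 0 ∨ (xs.length : Int) + e ≤ s) :
    PySem.List.slice xs (some s) (some e) = [] := by
  apply List.eq_nil_of_length_eq_zero
  rw [PySem.List.length_slice]
  unfold PySem.List.clampIdx
  split_ifs <;> omega

-- ===== VERDICT (by name: the statement is the Claim_ definition above) =====
theorem format_hunk_lines_py_spec : Claim_equal_format_hunk_lines_py := by
  unfold Claim_equal_format_hunk_lines_py
  intro ol nl os oe ns ne hdom hpre
  obtain ⟨⟨hAct_o, hDeg_o⟩, ⟨hAct_n, hDeg_n⟩⟩ := hpre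
  unfold Spec_format_hunk_lines_py format_hunk_lines_py format_hunk_lines_py_alt
  dsimp only
  -- shared data of the two ports
  have hfacts := lcsBack_facts (PySem.List.slice ol (some os) (some oe))
      (PySem.List.slice nl (some ns) (some ne))
      (lcsDp (PySem.List.slice ol (some os) (some oe)) (PySem.List.slice nl (some ns) (some ne)))
      (PySem.List.slice ol (some os) (some oe)).length (PySem.List.slice nl (some ns) (some ne)).length
  have hlcsB : ∀ p ∈ compute_lcs (PySem.List.slice ol (some os) (some oe)) (PySem.List.slice nl (some ns) (some ne)),
      0 ≤ p.1 ∧ p.1 < ((PySem.List.slice ol (some os) (some oe)).length : Int) ∧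
      0 ≤ p.2 ∧ p.2 < ((PySem.List.slice nl (some ns) (some ne)).length : Int) := by
    intro p hp
    exact hfacts.1 p (List.mem_reverse.mp hp)
  have hlcsM : List.Pairwise (fun p q : Int × Int => p.1 < q.1 ∧ p.2 < q.2)
      (compute_lcs (PySem.List.slice ol (some os) (some oe)) (PySem.List.slice nl (some ns) (some ne))) := by
    unfold compute_lcs
    rw [List.pairwise_reverse]
    exact hfacts.2.imp (fun h => ⟨h.1, h.2⟩)
  have hbound : ∀ p ∈ (compute_lcs (PySem.List.slice ol (some os) (some oe))
        (PySem.List.slice nl (some ns) (some ne))).map (fun p => (os + p.1, ns + p.2)),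
      os ≤ p.1 ∧ p.1 < oe ∧ ns ≤ p.2 ∧ p.2 < ne := by
    intro p hp
    obtain ⟨q, hq, rfl⟩ := List.mem_map.mp hp
    have hb := hlcsB q hq
    by_cases ho : os < oe
    · by_cases hn : ns < ne
      · have h1 := slice_length_le ol os oe (le_of_lt ho)
        have h2 := slice_length_le nl ns ne (le_of_lt hn)
        exact ⟨by omega, by omega, by omega, by omega⟩
      · exfalso
        have : PySem.List.slice nl (some ns) (some ne) = [] :=
          slice_degen_nil nl ns ne (by omega) (hDeg_n (by omega))
        rw [this] at hb; simp at hb; omega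
    · exfalso
      have : PySem.List.slice ol (some os) (some oe) = [] :=
        slice_degen_nil ol os oe (by omega) (hDeg_o (by omega))
      rw [this] at hb; simp at hb; omega
  refine walkA_eq_walkB ol nl os oe ns ne _ _ _
      ?_ hbound ?_ ?_ _ [] _ os ns (by simp) (by simp) le_rfl le_rfl ?_ (by omega)
  · rw [List.pairwise_map]
    exact hlcsM.imp (fun h => ⟨by omega, by omega⟩)
  · intro x
    simp only [PySem.Set.mem_diff, PySem.Set.mem_ofList, PySem.List.mem_pyRange_one]
    tauto
  · intro x
    simp only [PySem.Set.mem_diff, PySem.Set.mem_ofList, PySem.List.mem_pyRange_one]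
    tauto
  · intro a ha
    have := hbound a (List.mem_of_mem_head? ha)
    omega
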